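-- pv_equiv track=rewrite | github.com/ip4407/Python-Basics | lesson-4/les4-ex6.py | cycle_generator
-- ===== SOURCE A (Python) =====
-- from itertools import count, cycle
--
-- def cycle_generator(list_value, repetition_rate):
--     repetition_counter = 0
--     for i in cycle(list_value):
--         if repetition_counter < repetition_rate:
--             repetition_counter += 1
--             yield i
--         else:
--             break
-- ===== SOURCE B (Python) =====
-- def cycle_generator(list_value, repetition_rate):
--     if not list_value or repetition_rate <= 0:
--         return
--     full, part = divmod(repetition_rate, len(list_value))
--     yield from list_value * full
--     yield from list_value[:part]
-- ===== Notes on version B (the rewrite author's own statement) =====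
-- stated objective: alternative
-- what changed: Instead of walking an infinite cycle() iterator element by element with a counter and break, B computes divmod(rate, len) once and emits the result in two bulk stages: the whole list replicated `full` times followed by a prefix slice of length `part`.
import Mathlib
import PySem

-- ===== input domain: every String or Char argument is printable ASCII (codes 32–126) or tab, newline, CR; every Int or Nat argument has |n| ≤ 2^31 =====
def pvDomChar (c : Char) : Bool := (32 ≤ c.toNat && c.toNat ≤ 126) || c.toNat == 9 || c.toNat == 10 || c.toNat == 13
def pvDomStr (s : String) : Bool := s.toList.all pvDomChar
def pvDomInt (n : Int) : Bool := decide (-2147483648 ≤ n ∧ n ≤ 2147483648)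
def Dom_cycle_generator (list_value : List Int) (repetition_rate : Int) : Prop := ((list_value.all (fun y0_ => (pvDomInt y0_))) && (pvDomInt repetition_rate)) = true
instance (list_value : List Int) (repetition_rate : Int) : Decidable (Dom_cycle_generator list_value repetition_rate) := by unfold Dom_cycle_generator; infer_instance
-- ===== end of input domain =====

-- B replaces A's element-by-element walk of the infinite cycle() iterator by one divmod and
-- two bulk stages (list replication, then a prefix slice); same yielded sequence, proved below.

-- ===== PORT A =====
-- A walks the infinite stream cycle(list_value), yielding while the counter is below
-- repetition_rate; the remaining yield budget (repetition_rate - counter, here already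
-- (repetition_rate).toNat) is the fuel, `rest` is the not-yet-consumed tail of the current
-- pass of the cycle (refilled from the original list when exhausted; cycle([]) yields nothing).
def cycleGo (orig : List Int) (rest : List Int) : Nat → List Int
  | 0 => []
  | Nat.succ n =>
    match rest with
    | x :: rs => x :: cycleGo orig rs n
    | [] =>
      match orig with
      | [] => []                       -- cycle([]) is exhausted: the loop ends, nothing yielded
      | y :: ys => y :: cycleGo orig ys n

def cycle_generator (list_value : List Int) (repetition_rate : Int) : List Int :=
  cycleGo list_value list_value repetition_rate.toNat

-- ===== PORT B =====
-- list_value * full → flatten of `full` copies; list_value[:part] → take (part ≥ 0 here)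
def cycle_generator_alt (list_value : List Int) (repetition_rate : Int) : List Int :=
  if list_value = [] ∨ repetition_rate ≤ 0 then []
  else
    let full := PySem.Int.floordiv repetition_rate (list_value.length : Int)
    let part := PySem.Int.mod repetition_rate (list_value.length : Int)
    (List.replicate full.toNat list_value).flatten ++ list_value.take part.toNat

-- ===== PRECONDITION & SPEC =====
def Spec_cycle_generator (list_value : List Int) (repetition_rate : Int) (out : List Int) : Prop := out = cycle_generator_alt list_value repetition_rate
instance (list_value : List Int) (repetition_rate : Int) (out : List Int) : Decidable (Spec_cycle_generator list_value repetition_rate out) := by unfold Spec_cycle_generator; infer_instance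

-- ===== CLAIM =====
def Claim_equal_cycle_generator : Prop := ∀ (list_value : List Int) (repetition_rate : Int), Dom_cycle_generator list_value repetition_rate → Spec_cycle_generator list_value repetition_rate (cycle_generator list_value repetition_rate)

-- ===== LEMMAS AND PROOFS =====

-- Restarting from an empty `rest` is the same as restarting from the full list.
theorem cycleGo_nil_rest (lv : List Int) (m : Nat) : cycleGo lv [] m = cycleGo lv lv m := by
  cases m with
  | zero => rfl
  | succ n => cases lv <;> rfl

-- While the budget fits in the current pass, the loop just emits a prefix of `rest`.
theorem cycleGo_take (lv : List Int) (rest : List Int) (m : Nat) (h : m ≤ rest.length) :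
    cycleGo lv rest m = rest.take m := by
  induction rest generalizing m with
  | nil =>
      have : m = 0 := by simpa using h
      subst this; rfl
  | cons x rs ih =>
    cases m with
    | zero => rfl
    | succ n => simp only [cycleGo, List.take_succ_cons]
                rw [ih n (by simpa using h)]

-- Consuming exactly the current pass emits it wholesale and restarts the cycle.
theorem cycleGo_pass (lv : List Int) (rest : List Int) (m : Nat) :
    cycleGo lv rest (rest.length + m) = rest ++ cycleGo lv lv m := by
  induction rest with
  | nil => simpa using cycleGo_nil_rest lv m
  | cons x rs ih => simpa [cycleGo, List.length_cons, Nat.succ_add] using ih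

-- q full passes emit q copies of the list, then the loop continues with budget m.
theorem cycleGo_flatten (lv : List Int) (q m : Nat) :
    cycleGo lv lv (q * lv.length + m) =
      (List.replicate q lv).flatten ++ cycleGo lv lv m := by
  induction q with
  | zero => simp
  | succ p ih =>
    have : (p + 1) * lv.length + m = lv.length + (p * lv.length + m) := by ring
    rw [this, cycleGo_pass, ih, List.replicate_succ, List.flatten_cons, List.append_assoc]

theorem cycle_generator_spec : Claim_equal_cycle_generator := by
  intro lv rr _
  unfold Spec_cycle_generator cycle_generator cycle_generator_alt
  by_cases h : lv = [] ∨ rr ≤ 0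
  · rw [if_pos h]
    rcases h with h | h
    · subst h
      have : cycleGo [] [] rr.toNat = [] := by
        cases hm : rr.toNat with
        | zero => rfl
        | succ n => rfl
      exact this
    · have : rr.toNat = 0 := Int.toNat_of_nonpos h
      rw [this]; rfl
  · rw [if_neg h]
    rw [not_or] at h
    obtain ⟨hne, hrle⟩ := h
    have hpos : 0 < rr := by omega
    have hlen : 0 < lv.length := List.length_pos_iff.mpr hne
    have hlenI : (0:Int) < (lv.length : Int) := by exact_mod_cast hlen
    -- floordiv/mod with a positive divisor agree with Nat division on rr.toNat
    have hrr : rr = (rr.toNat : Int) := (Int.toNat_of_nonneg (le_of_lt hpos)).symm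
    have hfd : PySem.Int.floordiv rr (lv.length : Int) = ((rr.toNat / lv.length : Nat) : Int) := by
      rw [hrr]; exact_mod_cast PySem.Int.floordiv_natCast rr.toNat lv.length
    have hmd : PySem.Int.mod rr (lv.length : Int) = ((rr.toNat % lv.length : Nat) : Int) := by
      rw [hrr]; exact_mod_cast PySem.Int.mod_natCast rr.toNat lv.length
    rw [hfd, hmd]
    simp only [Int.toNat_natCast]
    have hsplit : rr.toNat = rr.toNat / lv.length * lv.length + rr.toNat % lv.length := by
      rw [Nat.mul_comm]; exact (Nat.div_add_mod rr.toNat lv.length).symm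
    calc cycleGo lv lv rr.toNat
        = cycleGo lv lv (rr.toNat / lv.length * lv.length + rr.toNat % lv.length) := by rw [← hsplit]
      _ = (List.replicate (rr.toNat / lv.length) lv).flatten ++ cycleGo lv lv (rr.toNat % lv.length) :=
          cycleGo_flatten lv _ _
      _ = (List.replicate (rr.toNat / lv.length) lv).flatten ++ lv.take (rr.toNat % lv.length) := by
          rw [cycleGo_take lv lv _ (le_of_lt (Nat.mod_lt _ hlen))]
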